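-- pv_equiv track=rewrite | github.com/zxnie/smart-contracts | lib_secret_sharing_v7.py | get_sibling_dict
-- ===== SOURCE A (Python) =====
-- def get_sibling_dict(N):
--     sibling_dict = {}
--     for i in range(0, N, 2):
--         # Handle the case where there is an odd number of nodes
--         if i + 1 >= N:
--             sibling_dict[i] = i
--         else:
--             sibling_dict[i] = i + 1
--             sibling_dict[i + 1] = i
--     return sibling_dict
-- ===== SOURCE B (Python) =====
-- def get_sibling_dict(N):
--     # Stage 1: build the sibling sequence [1, 0, 3, 2, ...] by interleaving
--     # the odd indices with the even indices (pairwise), no per-step branch.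
--     sibs = [s for pair in zip(range(1, N, 2), range(0, N, 2)) for s in pair]
--     # Stage 2: an odd N leaves the last index unpaired; it is its own sibling.
--     if N % 2 == 1:
--         sibs.append(N - 1)
--     # Stage 3: zip the index sequence with its sibling sequence.
--     return dict(zip(range(N), sibs))
-- ===== Notes on version B (the rewrite author's own statement) =====
-- stated objective: alternative
-- what changed: Replaces A's step-two loop with its per-iteration odd-node branch and one-or-two dict writes by a staged, branch-free construction: interleave the odd and even index progressions (zip + flatten) into the sibling sequence, append the single self-paired leftover when N is odd, and build the dict by zipping the index sequence with it.
import Mathlib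
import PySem

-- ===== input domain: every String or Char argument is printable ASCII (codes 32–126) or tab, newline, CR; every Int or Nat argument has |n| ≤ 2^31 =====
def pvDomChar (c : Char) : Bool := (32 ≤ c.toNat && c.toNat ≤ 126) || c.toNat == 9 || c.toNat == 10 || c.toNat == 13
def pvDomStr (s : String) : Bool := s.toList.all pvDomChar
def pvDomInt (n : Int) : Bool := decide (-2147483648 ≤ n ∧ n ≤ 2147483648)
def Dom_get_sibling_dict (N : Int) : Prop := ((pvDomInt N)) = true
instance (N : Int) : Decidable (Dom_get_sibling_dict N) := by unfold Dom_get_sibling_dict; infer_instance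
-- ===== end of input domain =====

-- B replaces A's step-2 loop with its per-iteration odd-node branch by a staged, branch-free
-- construction: interleave the odd and even index progressions into the sibling sequence,
-- append the self-paired leftover once if N is odd, and zip it with the index sequence.


-- ===== PORT A =====
def get_sibling_dict (N : Int) : List (Int × Int) :=
  ((PySem.List.pyRange 0 N 2).foldl
    (fun d i =>
      if N ≤ i + 1 then d.insert i i
      else (d.insert i (i + 1)).insert (i + 1) i)
    PySem.Dict.empty).items

-- ===== PORT B =====
def get_sibling_dict_alt (N : Int) : List (Int × Int) :=
  let sibs0 := ((PySem.List.pyRange 1 N 2).zip (PySem.List.pyRange 0 N 2)).flatMap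
    (fun p => [p.1, p.2])
  let sibs := if PySem.Int.mod N 2 == 1 then sibs0 ++ [N - 1] else sibs0
  (((PySem.List.pyRange 0 N 1).zip sibs).foldl
    (fun d p => d.insert p.1 p.2) PySem.Dict.empty).items

-- ===== PRECONDITION & SPEC =====
def Spec_get_sibling_dict (N : Int) (out : List (Int × Int)) : Prop := out = get_sibling_dict_alt N
instance (N : Int) (out : List (Int × Int)) : Decidable (Spec_get_sibling_dict N out) := by unfold Spec_get_sibling_dict; infer_instance

-- ===== CLAIM (what is proved, stated in full; the proofs are below) =====
def Claim_equal_get_sibling_dict : Prop := ∀ (N : Int), Dom_get_sibling_dict N → Spec_get_sibling_dict N (get_sibling_dict N)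

-- ===== LEMMAS AND PROOFS =====

-- the sibling of index i among N nodes (proof device shared by both sides)
def pvSib (N i : Int) : Int :=
  if i % 2 = 0 then (if i + 1 < N then i + 1 else i) else i - 1

theorem pv_sib_even (N : Int) (j : Nat) :
    pvSib N (2*(j:Int)) = if 2*(j:Int) + 1 < N then 2*(j:Int) + 1 else 2*(j:Int) := by
  simp [pvSib]

theorem pv_sib_odd (N : Int) (j : Nat) :
    pvSib N (2*(j:Int) + 1) = 2*(j:Int) := by
  simp [pvSib]

-- the interleaved pair list IS the sibling sequence of the first 2m indices
theorem pv_core (N : Int) (m : Nat) (h : 2*(m:Int) ≤ N) :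
    ((List.range m).map (fun k : Nat => ((1:Int) + 2*(k:Int), (0:Int) + 2*(k:Int)))).flatMap
      (fun p => [p.1, p.2])
    = (PySem.List.pyRange 0 (2*(m:Int)) 1).map (pvSib N) := by
  induction m with
  | zero => simp [PySem.List.pyRange_one_eq_nil]
  | succ m ih =>
    have hm : 2*((m:Int)) ≤ N := by push_cast at h ⊢; omega
    rw [List.range_succ, List.map_append, List.flatMap_append, ih hm]
    have hr : PySem.List.pyRange 0 (2*(((m:Int))+1)) 1
        = PySem.List.pyRange 0 (2*(m:Int)) 1 ++ [2*(m:Int), 2*(m:Int)+1] := by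
      rw [show (2*((m:Int)+1)) = (2*(m:Int) + 1) + 1 by ring,
        PySem.List.pyRange_one_succ_right (by omega),
        PySem.List.pyRange_one_succ_right (by omega)]
      simp
    push_cast
    rw [hr, List.map_append]
    have he : pvSib N (2*(m:Int)) = 2*(m:Int) + 1 := by
      rw [pv_sib_even]; have : 2*(m:Int) + 1 < N := by push_cast at h; omega
      simp [this]
    simp [he, pv_sib_odd N m]
    omega

-- B's staged construction produces exactly the (index, sibling) pair list
theorem pv_alt_eq (N : Int) :
    get_sibling_dict_alt N = (PySem.List.pyRange 0 N 1).map (fun i => (i, pvSib N i)) := by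
  unfold get_sibling_dict_alt
  dsimp only
  by_cases hN : 0 < N
  · -- counts of the two step-2 ranges
    set m : Nat := (N / 2).toNat with hm
    have hzip : (PySem.List.pyRange 1 N 2).zip (PySem.List.pyRange 0 N 2)
        = (List.range m).map (fun k : Nat => ((1:Int) + 2*(k:Int), (0:Int) + 2*(k:Int))) := by
      rw [PySem.List.pyRange_of_pos 1 N (by omega : (0:Int) < 2),
          PySem.List.pyRange_of_pos 0 N (by omega : (0:Int) < 2)]
      have hc1 : (if (1:Int) < N then ((N - 1 + 2 - 1)/2).toNat else 0) = m := by
        by_cases h1 : (1:Int) < N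
        · simp [h1, hm]; omega
        · simp [h1, hm]; omega
      have hc0 : (if (0:Int) < N then ((N - 0 + 2 - 1)/2).toNat else 0) = m + (((N+1)/2).toNat - m) := by
        simp [hN, hm]; omega
      rw [hc1, hc0, List.range_add, List.map_append]
      have hza := List.zip_append
        (l₁ := (List.range m).map (fun k : Nat => (1:Int) + 2*(k:Int))) (r₁ := [])
        (l₂ := (List.range m).map (fun k : Nat => (0:Int) + 2*(k:Int)))
        (r₂ := ((List.range (((N+1)/2).toNat - m)).map (fun x => m + x)).map
          (fun k : Nat => (0:Int) + 2*(k:Int)))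
        (by simp)
      simp only [List.append_nil] at hza
      rw [hza, List.zip_map']
      simp
    rw [hzip, pv_core N m (by omega)]
    have hsibs : (if (PySem.Int.mod N 2 == 1) = true
          then (PySem.List.pyRange 0 (2*(m:Int)) 1).map (pvSib N) ++ [N - 1]
          else (PySem.List.pyRange 0 (2*(m:Int)) 1).map (pvSib N))
        = (PySem.List.pyRange 0 N 1).map (pvSib N) := by
      rw [PySem.Int.mod_eq_emod_of_pos (by omega : (0:Int) < 2)]
      by_cases hpar : N % 2 = 1
      · have h2m : 2*(m:Int) = N - 1 := by omega
        have hlast : pvSib N (N - 1) = N - 1 := by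
          have := pv_sib_even N m
          rw [h2m] at this
          rw [this]; simp
        simp only [hpar, h2m]
        rw [if_pos (by decide), show N = (N-1) + 1 by ring,
          PySem.List.pyRange_one_succ_right (by omega), List.map_append]
        simp [hlast]
      · have h2m : 2*(m:Int) = N := by omega
        have : ¬ ((N % 2 == 1) = true) := by simpa using hpar
        rw [if_neg this, h2m]
    rw [hsibs]
    have hzip2 : ∀ (l : List Int), l.zip (l.map (pvSib N)) = l.map (fun i => (i, pvSib N i)) := by
      intro l
      induction l with
      | nil => simp
      | cons a t ih => simp [ih]
    rw [hzip2 _, List.foldl_map]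
    have h := PySem.Dict.items_foldl_insert_fresh (PySem.List.pyRange 0 N 1)
      (fun i => (i, pvSib N i).1) (fun i => (i, pvSib N i).2) PySem.Dict.empty
      (by intro a _; simp) (by simpa using PySem.List.nodup_pyRange_one 0 N)
    simpa using h
  · -- N ≤ 0: every range is empty, the zip with the empty index list is empty
    rw [PySem.List.pyRange_one_eq_nil (by omega : N ≤ 0)]
    simp
    rfl

-- a key ≥ the range bound is absent from the partially built dict
theorem pv_not_contains (N a b : Int) (hab : a ≤ b) :
    (PySem.Dict.mk ((PySem.List.pyRange 0 a 1).map (fun i => (i, pvSib N i)))).contains b = false := by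
  rw [PySem.Dict.contains_mk]
  simp only [List.any_eq_false]
  intro p hp
  obtain ⟨i, hi, rfl⟩ := List.mem_map.mp hp
  have := (PySem.List.mem_pyRange_one).mp hi
  simp only [beq_iff_eq]
  omega

-- the invariant of A's step-2 loop: after j iterations the dict holds the first min(2j, N) pairs
theorem pv_a_inv (N : Int) (j : Nat) (hj : 2*(j:Int) ≤ N + 1) :
    ((List.range j).map (fun k : Nat => (0:Int) + 2 * (k:Int))).foldl
      (fun d i =>
        if N ≤ i + 1 then d.insert i i
        else (d.insert i (i + 1)).insert (i + 1) i)
      PySem.Dict.empty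
    = PySem.Dict.mk ((PySem.List.pyRange 0 (min (2*(j:Int)) N) 1).map (fun i => (i, pvSib N i))) := by
  induction j with
  | zero =>
    simp
    rfl
  | succ j ih =>
    have hj' : 2*(j:Int) ≤ N + 1 := by push_cast at hj ⊢; omega
    have h2j : 2*(j:Int) < N := by push_cast at hj; omega
    have hmin : min (2*(j:Int)) N = 2*(j:Int) := by omega
    rw [List.range_succ, List.map_append, List.foldl_append, ih hj']
    simp only [List.map_cons, List.map_nil, List.foldl_cons, List.foldl_nil, zero_add, hmin]
    by_cases hodd : N ≤ 2*(j:Int) + 1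
    · -- N = 2j+1 : single self-pair
      have hN : N = 2*(j:Int) + 1 := by omega
      rw [if_pos hodd]
      apply PySem.Dict.ext
      rw [PySem.Dict.items_insert_of_not_contains _ _ (pv_not_contains N _ _ (by omega))]
      have hr : PySem.List.pyRange 0 (min (2*((j:Int)+1)) N) 1
          = PySem.List.pyRange 0 (2*(j:Int)) 1 ++ [2*(j:Int)] := by
        have : min (2*((j:Int)+1)) N = 2*(j:Int) + 1 := by omega
        rw [this, PySem.List.pyRange_one_succ_right (by omega)]
      push_cast
      rw [hr, List.map_append]
      have he : pvSib N (2*(j:Int)) = 2*(j:Int) := by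
        rw [pv_sib_even, if_neg (by omega)]
      simp [he]
    · -- two pairs
      rw [if_neg hodd]
      apply PySem.Dict.ext
      rw [PySem.Dict.items_insert_of_not_contains]
      · rw [PySem.Dict.items_insert_of_not_contains _ _ (pv_not_contains N _ _ (by omega))]
        have hr : PySem.List.pyRange 0 (min (2*((j:Int)+1)) N) 1
            = PySem.List.pyRange 0 (2*(j:Int)) 1 ++ [2*(j:Int), 2*(j:Int)+1] := by
          have hm : min (2*((j:Int)+1)) N = 2*(j:Int) + 2 := by omega
          rw [hm, show (2*(j:Int) + 2) = (2*(j:Int) + 1) + 1 by ring,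
            PySem.List.pyRange_one_succ_right (by omega),
            PySem.List.pyRange_one_succ_right (by omega)]
          simp
        push_cast
        rw [hr, List.map_append]
        have he : pvSib N (2*(j:Int)) = 2*(j:Int) + 1 := by
          rw [pv_sib_even]; simp [show 2*(j:Int) + 1 < N by omega]
        simp [he, pv_sib_odd N j, List.append_assoc]
      · -- 2j+1 absent after inserting 2j
        rw [PySem.Dict.contains_insert]
        simp only [Bool.or_eq_false_iff, beq_eq_false_iff_ne, ne_eq]
        exact ⟨by omega, pv_not_contains N _ _ (by omega)⟩

-- ===== VERDICT (by name: the statement is the Claim_ definition above) =====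
theorem get_sibling_dict_spec : Claim_equal_get_sibling_dict := by
  intro N _
  unfold Spec_get_sibling_dict
  rw [pv_alt_eq]
  unfold get_sibling_dict
  rw [PySem.List.pyRange_of_pos 0 N (by omega : (0:Int) < 2)]
  by_cases hN : 0 < N
  · rw [if_pos hN]
    have h := pv_a_inv N ((N - 0 + 2 - 1)/2).toNat (by omega)
    rw [h]
    have hm : min (2*((((N - 0 + 2 - 1)/2).toNat : Nat):Int)) N = N := by omega
    rw [hm]
  · rw [if_neg hN]
    simp [PySem.List.pyRange_one_eq_nil (by omega : N ≤ 0)]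
    rfl
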